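-- pv_equiv track=rewrite | github.com/rbrn1999/leetcode-sol | problems/858. Mirror Reflection.py | mirrorReflection
-- ===== SOURCE A (Python) =====
-- def mirrorReflection(p: int, q: int) -> int:
--     def gcd(x, y):
--        while(y):
--            x, y = y, x % y
--        return x
--
--     def lcm(x, y):
--        lcm = (x*y)//gcd(x,y)
--        return lcm
--
--     turn = lcm(p, q)
--     bottom = (turn // q) % 2
--     left = (turn // p) % 2
--
--     while bottom & left == 1:
--         turn *= 2
--         bottom = (turn // q) % 2
--         left = (turn // p) % 2
--
--     return (1 - bottom) +left
-- ===== SOURCE B (Python) =====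
-- def mirrorReflection(p: int, q: int) -> int:
--     # Unfolding argument: the receptor depends only on which of p, q carries
--     # more factors of 2.  Strip common factors of 2, then read off the parities.
--     while p % 2 == 0 and q % 2 == 0:
--         p //= 2
--         q //= 2
--     if p % 2 == 0:
--         return 2
--     if q % 2 == 0:
--         return 0
--     return 1
-- ===== Notes on version B (the rewrite author's own statement) =====
-- stated objective: alternative
-- what changed: B abandons A's gcd/lcm machinery entirely: by the unfolding argument the receptor depends only on which of p and q carries more factors of 2, so B strips common factors of 2 with a halving loop and reads the answer off the final parities.
import Mathlib
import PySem

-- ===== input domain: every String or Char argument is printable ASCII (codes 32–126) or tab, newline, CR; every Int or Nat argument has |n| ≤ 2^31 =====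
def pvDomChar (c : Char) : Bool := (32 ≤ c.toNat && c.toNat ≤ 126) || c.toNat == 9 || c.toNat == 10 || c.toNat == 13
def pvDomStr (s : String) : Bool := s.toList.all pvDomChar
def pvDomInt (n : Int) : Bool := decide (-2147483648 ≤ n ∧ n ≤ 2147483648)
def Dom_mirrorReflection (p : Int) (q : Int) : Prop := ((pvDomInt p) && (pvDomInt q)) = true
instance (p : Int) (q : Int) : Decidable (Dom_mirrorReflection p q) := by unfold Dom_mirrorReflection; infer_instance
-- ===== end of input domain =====

-- B replaces A's gcd/lcm computation and doubling while-loop by a halving loop that strips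
-- common factors of 2 and reads the receptor off the final parities (objective: alternative).


-- termination fact for A's hand-written Euclid loop
theorem pvModNatAbsLt (x y : Int) (h : y ≠ 0) : (PySem.Int.mod x y).natAbs < y.natAbs := by
  rcases lt_or_gt_of_ne h with hy | hy
  · have := PySem.Int.mod_neg_bounds x hy; omega
  · have h1 := PySem.Int.mod_nonneg x hy
    have h2 := PySem.Int.mod_lt x hy; omega

-- ===== PORT A =====
-- A's inner `while y: x, y = y, x % y` loop
def pvGcdLoop (x y : Int) : Int :=
  if h : y = 0 then x else pvGcdLoop y (PySem.Int.mod x y)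
termination_by y.natAbs
decreasing_by exact pvModNatAbsLt x y h

def pvLcm (x y : Int) : Int := PySem.Int.floordiv (x * y) (pvGcdLoop x y)

-- A's `while bottom & left == 1` loop; the fuel only makes the loop total — it is never
-- exhausted on inputs satisfying Pre_ (the proofs below show the loop exits within one iteration)
def pvLoopA (p q : Int) : Nat → Int → Int
  | 0, turn =>
      (1 - PySem.Int.mod (PySem.Int.floordiv turn q) 2) + PySem.Int.mod (PySem.Int.floordiv turn p) 2
  | fuel + 1, turn =>
      let bottom := PySem.Int.mod (PySem.Int.floordiv turn q) 2
      let left := PySem.Int.mod (PySem.Int.floordiv turn p) 2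
      if PySem.Int.band bottom left = 1 then pvLoopA p q fuel (turn * 2)
      else (1 - bottom) + left

def mirrorReflection (p : Int) (q : Int) : Int :=
  pvLoopA p q 64 (pvLcm p q)

-- ===== PORT B =====
-- B's `while p % 2 == 0 and q % 2 == 0: p //= 2; q //= 2` loop; the fuel only makes the
-- loop total — within Dom (|p| ≤ 2^31) and Pre (p ≠ 0) it is never exhausted
def pvHalveLoop : Nat → Int → Int → Int × Int
  | 0, p, q => (p, q)
  | fuel + 1, p, q =>
      if PySem.Int.mod p 2 = 0 ∧ PySem.Int.mod q 2 = 0 then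
        pvHalveLoop fuel (PySem.Int.floordiv p 2) (PySem.Int.floordiv q 2)
      else (p, q)

def mirrorReflection_alt (p : Int) (q : Int) : Int :=
  let r := pvHalveLoop 64 p q
  if PySem.Int.mod r.1 2 = 0 then 2
  else if PySem.Int.mod r.2 2 = 0 then 0
  else 1

-- ===== PRECONDITION & SPEC =====
-- A divides by q and by p: it raises ZeroDivisionError exactly when p = 0 or q = 0.
def Pre_mirrorReflection (p : Int) (q : Int) : Prop := p ≠ 0 ∧ q ≠ 0
instance (p : Int) (q : Int) : Decidable (Pre_mirrorReflection p q) := by unfold Pre_mirrorReflection; infer_instance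
def pvWitness_mirrorReflection : Int × Int := (3, 2)

def Spec_mirrorReflection (p : Int) (q : Int) (out : Int) : Prop := out = mirrorReflection_alt p q
instance (p : Int) (q : Int) (out : Int) : Decidable (Spec_mirrorReflection p q out) := by unfold Spec_mirrorReflection; infer_instance

-- ===== CLAIM (what is proved, stated in full; the proofs are below) =====
def Claim_equal_mirrorReflection : Prop := ∀ (p : Int) (q : Int), Dom_mirrorReflection p q → Pre_mirrorReflection p q → Spec_mirrorReflection p q (mirrorReflection p q)

-- ===== LEMMAS AND PROOFS =====

-- the common value both programs compute: the parity case analysis on p/gcd, q/gcd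
def pvS (p q : Int) : Int :=
  if PySem.Int.mod (PySem.Int.floordiv p (Int.gcd p q : Nat)) 2 = 0 then 2
  else if PySem.Int.mod (PySem.Int.floordiv q (Int.gcd p q : Nat)) 2 = 0 then 0
  else 1

theorem pvGcdLoop_dvd (x y : Int) : pvGcdLoop x y ∣ x ∧ pvGcdLoop x y ∣ y := by
  fun_induction pvGcdLoop x y with
  | case1 x => exact ⟨dvd_refl x, dvd_zero x⟩
  | case2 x y h ih =>
    refine ⟨?_, ih.1⟩
    have hd : pvGcdLoop y (PySem.Int.mod x y) ∣ PySem.Int.floordiv x y * y + PySem.Int.mod x y :=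
      dvd_add (ih.1.mul_left _) ih.2
    rwa [PySem.Int.floordiv_mul_add_mod] at hd

theorem dvd_pvGcdLoop (d x y : Int) (hx : d ∣ x) (hy : d ∣ y) : d ∣ pvGcdLoop x y := by
  fun_induction pvGcdLoop x y with
  | case1 x => exact hx
  | case2 x y h ih =>
    have hm : d ∣ PySem.Int.mod x y := by
      have hx2 : PySem.Int.mod x y = x - PySem.Int.floordiv x y * y := by
        have := PySem.Int.floordiv_mul_add_mod x y; omega
      rw [hx2]; exact dvd_sub hx (hy.mul_left _)
    exact ih hy hm

theorem pvGcdLoop_natAbs (x y : Int) : (pvGcdLoop x y).natAbs = Int.gcd x y := by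
  have h1 := pvGcdLoop_dvd x y
  have h2 : ((Int.gcd x y : Nat) : Int) ∣ pvGcdLoop x y :=
    dvd_pvGcdLoop _ x y (Int.gcd_dvd_left x y) (Int.gcd_dvd_right x y)
  have d1 := Int.natAbs_dvd_natAbs.mpr h2
  have d2 : (pvGcdLoop x y).natAbs ∣ Int.gcd x y :=
    Nat.dvd_gcd (Int.natAbs_dvd_natAbs.mpr h1.1) (Int.natAbs_dvd_natAbs.mpr h1.2)
  simp only [Int.natAbs_natCast] at d1
  exact Nat.dvd_antisymm d2 d1

theorem mod_two_neg (a : Int) : PySem.Int.mod (-a) 2 = PySem.Int.mod a 2 := by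
  rcases PySem.Int.mod_two_eq a with h | h
  · rw [h, PySem.Int.mod_eq_zero_iff_dvd]
    exact (Int.dvd_neg).mpr ((PySem.Int.mod_eq_zero_iff_dvd a 2).mp h)
  · rw [h]
    rcases PySem.Int.mod_two_eq (-a) with h' | h'
    · exfalso
      have h2 : (2:Int) ∣ a := (Int.dvd_neg).mp ((PySem.Int.mod_eq_zero_iff_dvd (-a) 2).mp h')
      have := (PySem.Int.mod_eq_zero_iff_dvd a 2).mpr h2
      omega
    · exact h'

theorem pvModTwoCongr (x y : Int) (h : (2:Int) ∣ x ↔ 2 ∣ y) :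
    PySem.Int.mod x 2 = PySem.Int.mod y 2 := by
  rcases PySem.Int.mod_two_eq x with hx | hx <;> rcases PySem.Int.mod_two_eq y with hy | hy <;>
    rw [hx, hy]
  · exfalso
    have := (PySem.Int.mod_eq_zero_iff_dvd y 2).mpr
      (h.mp ((PySem.Int.mod_eq_zero_iff_dvd x 2).mp hx))
    omega
  · exfalso
    have := (PySem.Int.mod_eq_zero_iff_dvd x 2).mpr
      (h.mpr ((PySem.Int.mod_eq_zero_iff_dvd y 2).mp hy))
    omega

-- ===== A-side: A computes pvS =====
theorem pvMainA (p q : Int) (hp : p ≠ 0) (hq : q ≠ 0) :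
    mirrorReflection p q = pvS p q := by
  unfold mirrorReflection pvLcm pvS
  have hd := pvGcdLoop_dvd p q
  have hnat := pvGcdLoop_natAbs p q
  set g0 := pvGcdLoop p q with hg0eq
  have hGne : Int.gcd p q ≠ 0 := by
    intro h
    exact hp (Int.eq_zero_of_gcd_eq_zero_left h)
  have hg0ne : g0 ≠ 0 := by
    intro h; rw [h] at hnat; simp at hnat; omega
  obtain ⟨a, ha⟩ := hd.1
  obtain ⟨b, hb⟩ := hd.2
  have ha0 : a ≠ 0 := by intro h; rw [h, mul_zero] at ha; exact hp ha
  have hb0 : b ≠ 0 := by intro h; rw [h, mul_zero] at hb; exact hq hb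
  have hturn : PySem.Int.floordiv (p * q) g0 = a * q := by
    have hpq : p * q = g0 * (a * q) := by rw [ha]; ring
    rw [hpq]
    exact Int.mul_fdiv_cancel_left _ hg0ne
  have hbq : PySem.Int.floordiv (a * q) q = a := by
    rw [mul_comm]
    exact Int.mul_fdiv_cancel_left _ hq
  have hlp : PySem.Int.floordiv (a * q) p = b := by
    have h1 : a * q = p * b := by rw [ha, hb]; ring
    rw [h1]
    exact Int.mul_fdiv_cancel_left _ hp
  have hbq2 : PySem.Int.floordiv (a * q * 2) q = 2 * a := by
    have h1 : a * q * 2 = q * (2 * a) := by ring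
    rw [h1]
    exact Int.mul_fdiv_cancel_left _ hq
  have hlp2 : PySem.Int.floordiv (a * q * 2) p = 2 * b := by
    have h1 : a * q * 2 = p * (2 * b) := by rw [ha, hb]; ring
    rw [h1]
    exact Int.mul_fdiv_cancel_left _ hp
  have hgcast : ((Int.gcd p q : Nat) : Int) ≠ 0 := by exact_mod_cast hGne
  set G := ((Int.gcd p q : Nat) : Int) with hGdef
  have hsign : g0 = G ∨ g0 = -G := by omega
  have hpr : PySem.Int.mod (PySem.Int.floordiv p G) 2 =
      PySem.Int.mod a 2 := by
    rcases hsign with hs | hs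
    · rw [ha, hs, show PySem.Int.floordiv (G * a) G = a from Int.mul_fdiv_cancel_left _ hgcast]
    · have h1 : p = G * (-a) := by rw [ha, hs]; ring
      rw [h1, show PySem.Int.floordiv (G * (-a)) G = -a from Int.mul_fdiv_cancel_left _ hgcast,
        mod_two_neg]
  have hqr : PySem.Int.mod (PySem.Int.floordiv q G) 2 =
      PySem.Int.mod b 2 := by
    rcases hsign with hs | hs
    · rw [hb, hs, show PySem.Int.floordiv (G * b) G = b from Int.mul_fdiv_cancel_left _ hgcast]
    · have h1 : q = G * (-b) := by rw [hb, hs]; ring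
      rw [h1, show PySem.Int.floordiv (G * (-b)) G = -b from Int.mul_fdiv_cancel_left _ hgcast,
        mod_two_neg]
  have hnotboth : ¬ (PySem.Int.mod a 2 = 0 ∧ PySem.Int.mod b 2 = 0) := by
    rintro ⟨hA, hB⟩
    obtain ⟨a', ha'⟩ := (PySem.Int.mod_eq_zero_iff_dvd a 2).mp hA
    obtain ⟨b', hb'⟩ := (PySem.Int.mod_eq_zero_iff_dvd b 2).mp hB
    have h2p : (2 * g0) ∣ p := ⟨a', by rw [ha, ha']; ring⟩
    have h2q : (2 * g0) ∣ q := ⟨b', by rw [hb, hb']; ring⟩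
    have hdg : (2 * g0).natAbs ∣ Int.gcd p q :=
      Nat.dvd_gcd (Int.natAbs_dvd_natAbs.mpr h2p) (Int.natAbs_dvd_natAbs.mpr h2q)
    have habs : (2 * g0).natAbs = 2 * Int.gcd p q := by
      rw [Int.natAbs_mul, hnat]; rfl
    rw [habs] at hdg
    have := Nat.le_of_dvd (Nat.pos_of_ne_zero hGne) hdg
    omega
  rw [hturn]
  rw [show (64 : Nat) = 63 + 1 from rfl, pvLoopA]
  simp only [hbq, hlp, hpr, hqr]
  rcases PySem.Int.mod_two_eq a with hA | hA <;> rcases PySem.Int.mod_two_eq b with hB | hB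
  · exact absurd ⟨hA, hB⟩ hnotboth
  · rw [hA, hB]
    norm_num [show PySem.Int.band 0 1 = 0 from by decide]
  · rw [hA, hB]
    norm_num [show PySem.Int.band 1 0 = 0 from by decide]
  · rw [hA, hB]
    rw [show PySem.Int.band 1 1 = 1 from by decide]
    norm_num
    rw [show (63 : Nat) = 62 + 1 from rfl, pvLoopA]
    rw [hbq2, hlp2]
    rw [show PySem.Int.mod (2*a) 2 = 0 from (PySem.Int.mod_eq_zero_iff_dvd _ 2).mpr ⟨a, rfl⟩]
    rw [show PySem.Int.mod (2*b) 2 = 0 from (PySem.Int.mod_eq_zero_iff_dvd _ 2).mpr ⟨b, rfl⟩]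
    norm_num [show PySem.Int.band 0 0 = 0 from by decide]

-- ===== B-side: B computes pvS =====

-- when p and q are not both even, the gcd is odd and dividing by it preserves both parities
theorem pvS_base (p q : Int) (hp : p ≠ 0) (hq : q ≠ 0)
    (h : ¬ (PySem.Int.mod p 2 = 0 ∧ PySem.Int.mod q 2 = 0)) :
    pvS p q = (if PySem.Int.mod p 2 = 0 then 2
               else if PySem.Int.mod q 2 = 0 then 0 else 1) := by
  unfold pvS
  have hGne : Int.gcd p q ≠ 0 := by
    intro h0; exact hp (Int.eq_zero_of_gcd_eq_zero_left h0)
  have hgcast : ((Int.gcd p q : Nat) : Int) ≠ 0 := by exact_mod_cast hGne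
  have hGodd : ¬ ((2:Int) ∣ ((Int.gcd p q : Nat) : Int)) := by
    intro h2
    apply h
    constructor
    · exact (PySem.Int.mod_eq_zero_iff_dvd p 2).mpr (h2.trans (Int.gcd_dvd_left p q))
    · exact (PySem.Int.mod_eq_zero_iff_dvd q 2).mpr (h2.trans (Int.gcd_dvd_right p q))
  obtain ⟨m, hm⟩ := Int.gcd_dvd_left p q
  obtain ⟨n, hn⟩ := Int.gcd_dvd_right p q
  have hdp : PySem.Int.floordiv p ((Int.gcd p q : Nat) : Int) = m := by
    have h1 := Int.mul_fdiv_cancel_left m hgcast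
    rw [← hm] at h1
    exact h1
  have hdq : PySem.Int.floordiv q ((Int.gcd p q : Nat) : Int) = n := by
    have h1 := Int.mul_fdiv_cancel_left n hgcast
    rw [← hn] at h1
    exact h1
  have hmp : PySem.Int.mod m 2 = PySem.Int.mod p 2 := by
    apply pvModTwoCongr
    constructor
    · intro hd
      rw [hm]; exact hd.mul_left _
    · intro hd
      rw [hm] at hd
      rcases (Int.prime_two.dvd_mul).mp hd with h2 | h2
      · exact absurd h2 hGodd
      · exact h2
  have hnp : PySem.Int.mod n 2 = PySem.Int.mod q 2 := by
    apply pvModTwoCongr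
    constructor
    · intro hd
      rw [hn]; exact hd.mul_left _
    · intro hd
      rw [hn] at hd
      rcases (Int.prime_two.dvd_mul).mp hd with h2 | h2
      · exact absurd h2 hGodd
      · exact h2
  rw [hdp, hdq, hmp, hnp]

-- dividing both arguments by 2 leaves pvS unchanged
theorem pvS_halve (p q : Int) (hp : p ≠ 0)
    (hp2 : (2:Int) ∣ p) (hq2 : (2:Int) ∣ q) :
    pvS (PySem.Int.floordiv p 2) (PySem.Int.floordiv q 2) = pvS p q := by
  obtain ⟨p1, hp1⟩ := hp2
  obtain ⟨q1, hq1⟩ := hq2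
  have h2 : (2:Int) ≠ 0 := by norm_num
  have hfp : PySem.Int.floordiv p 2 = p1 := by
    have h1 := Int.mul_fdiv_cancel_left p1 h2
    rw [← hp1] at h1
    exact h1
  have hfq : PySem.Int.floordiv q 2 = q1 := by
    have h1 := Int.mul_fdiv_cancel_left q1 h2
    rw [← hq1] at h1
    exact h1
  have hp1ne : p1 ≠ 0 := by intro h0; rw [h0, mul_zero] at hp1; exact hp hp1
  have hgcd : Int.gcd p q = 2 * Int.gcd p1 q1 := by
    rw [hp1, hq1]
    unfold Int.gcd
    rw [Int.natAbs_mul, Int.natAbs_mul]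
    exact Nat.gcd_mul_left 2 _ _
  have hG1ne : Int.gcd p1 q1 ≠ 0 := by
    intro h0; exact hp1ne (Int.eq_zero_of_gcd_eq_zero_left h0)
  have hG1cast : ((Int.gcd p1 q1 : Nat) : Int) ≠ 0 := by exact_mod_cast hG1ne
  obtain ⟨m, hm⟩ := Int.gcd_dvd_left p1 q1
  obtain ⟨n, hn⟩ := Int.gcd_dvd_right p1 q1
  have hGcast : ((Int.gcd p q : Nat) : Int) = 2 * ((Int.gcd p1 q1 : Nat) : Int) := by
    rw [hgcd]; push_cast; ring
  have hGne : ((Int.gcd p q : Nat) : Int) ≠ 0 := by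
    rw [hGcast]
    exact mul_ne_zero h2 hG1cast
  have hpm : p = ((Int.gcd p q : Nat) : Int) * m := by
    linear_combination hp1 + 2 * hm - m * hGcast
  have hqn : q = ((Int.gcd p q : Nat) : Int) * n := by
    linear_combination hq1 + 2 * hn - n * hGcast
  have hdp : PySem.Int.floordiv p ((Int.gcd p q : Nat) : Int) = m := by
    have h1 := Int.mul_fdiv_cancel_left m hGne
    rw [← hpm] at h1
    exact h1
  have hdq : PySem.Int.floordiv q ((Int.gcd p q : Nat) : Int) = n := by
    have h1 := Int.mul_fdiv_cancel_left n hGne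
    rw [← hqn] at h1
    exact h1
  have hdp1 : PySem.Int.floordiv p1 ((Int.gcd p1 q1 : Nat) : Int) = m := by
    have h1 := Int.mul_fdiv_cancel_left m hG1cast
    rw [← hm] at h1
    exact h1
  have hdq1 : PySem.Int.floordiv q1 ((Int.gcd p1 q1 : Nat) : Int) = n := by
    have h1 := Int.mul_fdiv_cancel_left n hG1cast
    rw [← hn] at h1
    exact h1
  unfold pvS
  rw [hfp, hfq, hdp1, hdq1, hdp, hdq]

-- the halving loop with enough fuel computes pvS
theorem pvHalve_main : ∀ (f : Nat) (p q : Int), p ≠ 0 → q ≠ 0 → p.natAbs < 2 ^ f →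
    (if PySem.Int.mod (pvHalveLoop f p q).1 2 = 0 then (2:Int)
     else if PySem.Int.mod (pvHalveLoop f p q).2 2 = 0 then 0 else 1) = pvS p q := by
  intro f
  induction f with
  | zero =>
    intro p q hp _ hlt
    exfalso
    simp at hlt
    omega
  | succ f ih =>
    intro p q hp hq hlt
    rw [pvHalveLoop]
    by_cases h : PySem.Int.mod p 2 = 0 ∧ PySem.Int.mod q 2 = 0
    · simp only [if_pos h]
      have hp2 : (2:Int) ∣ p := (PySem.Int.mod_eq_zero_iff_dvd p 2).mp h.1
      have hq2 : (2:Int) ∣ q := (PySem.Int.mod_eq_zero_iff_dvd q 2).mp h.2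
      obtain ⟨p1, hp1⟩ := hp2
      obtain ⟨q1, hq1⟩ := hq2
      have h2 : (2:Int) ≠ 0 := by norm_num
      have hfp : PySem.Int.floordiv p 2 = p1 := by
        rw [hp1]; exact Int.mul_fdiv_cancel_left _ h2
      have hfq : PySem.Int.floordiv q 2 = q1 := by
        rw [hq1]; exact Int.mul_fdiv_cancel_left _ h2
      have hp1ne : p1 ≠ 0 := by intro h0; rw [h0, mul_zero] at hp1; exact hp hp1
      have hq1ne : q1 ≠ 0 := by intro h0; rw [h0, mul_zero] at hq1; exact hq hq1
      have hlt1 : p1.natAbs < 2 ^ f := by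
        have : p.natAbs = 2 * p1.natAbs := by rw [hp1, Int.natAbs_mul]; rfl
        have hpow : (2:Nat) ^ (f + 1) = 2 * 2 ^ f := by ring
        omega
      rw [ih (PySem.Int.floordiv p 2) (PySem.Int.floordiv q 2)
        (by rw [hfp]; exact hp1ne) (by rw [hfq]; exact hq1ne) (by rw [hfp]; exact hlt1)]
      exact pvS_halve p q hp ⟨p1, hp1⟩ ⟨q1, hq1⟩
    · simp only [if_neg h]
      exact (pvS_base p q hp hq h).symm

theorem pvMainB (p q : Int) (hp : p ≠ 0) (hq : q ≠ 0) (hlt : p.natAbs < 2 ^ 64) :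
    mirrorReflection_alt p q = pvS p q := by
  unfold mirrorReflection_alt
  exact pvHalve_main 64 p q hp hq hlt

-- ===== VERDICT (by name: the statement is the Claim_ definition above) =====
theorem mirrorReflection_spec : Claim_equal_mirrorReflection := by
  intro p q hdom hpre
  unfold Spec_mirrorReflection
  simp only [Dom_mirrorReflection, pvDomInt, Bool.and_eq_true, decide_eq_true_eq] at hdom
  have hlt : p.natAbs < 2 ^ 64 := by
    have : (2:Nat) ^ 64 = 18446744073709551616 := by norm_num
    omega
  rw [pvMainA p q hpre.1 hpre.2, pvMainB p q hpre.1 hpre.2 hlt]
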